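-- pv_equiv track=rewrite | github.com/jeury301/python-morsels | 8. tail/tail_solutions.py | v6_tail
-- ===== SOURCE A (Python) =====
-- def v6_tail(iterable, n):
--     """Return the last n items of given iterable.
--
--     We could fix this by doing something different in our loop whenever n is 1.
--
--     This might look a little silly/repetitive but it works.
--     """
--     items = []
--     if n <= 0:
--         return []
--     for item in iterable:
--         if n == 1:
--             items = [item]
--         else:
--             items = [*items[-n+1:], item]
--     return items
-- ===== SOURCE B (Python) =====
-- def v6_tail(iterable, n):
--     """Return the last n items of given iterable."""
--     if n <= 0:
--         return []
--     items = list(iterable)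
--     return items[-n:]
-- ===== Notes on version B (the rewrite author's own statement) =====
-- stated objective: simpler
-- what changed: Replaces A's per-item sliding-window accumulation loop (rebuilding the last-n window at every element) with a single full materialization of the iterable followed by one negative-index tail slice.
import Mathlib
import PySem

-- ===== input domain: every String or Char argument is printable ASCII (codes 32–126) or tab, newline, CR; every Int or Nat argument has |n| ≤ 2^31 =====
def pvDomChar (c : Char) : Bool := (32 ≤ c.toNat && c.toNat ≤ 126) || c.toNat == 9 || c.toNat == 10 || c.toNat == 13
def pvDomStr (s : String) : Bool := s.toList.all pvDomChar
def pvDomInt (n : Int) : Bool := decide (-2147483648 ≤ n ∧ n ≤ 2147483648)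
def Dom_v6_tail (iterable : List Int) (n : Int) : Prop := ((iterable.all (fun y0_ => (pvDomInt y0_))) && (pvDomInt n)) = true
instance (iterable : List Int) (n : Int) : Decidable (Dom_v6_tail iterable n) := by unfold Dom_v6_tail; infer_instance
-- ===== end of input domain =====

-- B replaces A's per-item sliding-window accumulation with one materialization plus a tail slice (simpler decomposition).


-- ===== PORT A =====
-- the loop body: if n == 1 then items = [item] else items = [*items[-n+1:], item]
def v6_tailStep (n : Int) (items : List Int) (item : Int) : List Int :=
  if n == 1 then [item] else (PySem.List.slice items (some (-n + 1)) none) ++ [item]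

def v6_tail (iterable : List Int) (n : Int) : List Int :=
  if n ≤ 0 then []
  else iterable.foldl (v6_tailStep n) []

-- ===== PORT B =====
def v6_tail_alt (iterable : List Int) (n : Int) : List Int :=
  if n ≤ 0 then []
  else PySem.List.slice iterable (some (-n)) none

-- ===== PRECONDITION & SPEC =====
def Spec_v6_tail (iterable : List Int) (n : Int) (out : List Int) : Prop := out = v6_tail_alt iterable n
instance (iterable : List Int) (n : Int) (out : List Int) : Decidable (Spec_v6_tail iterable n out) := by unfold Spec_v6_tail; infer_instance

-- ===== CLAIM (what is proved, stated in full; the proofs are below) =====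
def Claim_equal_v6_tail : Prop := ∀ (iterable : List Int) (n : Int), Dom_v6_tail iterable n → Spec_v6_tail iterable n (v6_tail iterable n)

-- ===== LEMMAS AND PROOFS =====

-- negative-start slice is a drop of the clamped index
lemma slice_neg_start (xs : List Int) (k : Nat) (hk : 0 < k) :
    PySem.List.slice xs (some (-(k : Int))) none = xs.drop (xs.length - k) := by
  rw [PySem.List.slice_from_neg_natCast xs k hk]

-- the loop invariant: starting from [], A's fold over l keeps exactly the last k items of l
lemma foldl_window (k : Nat) (hk : 1 ≤ k) (l : List Int) :
    l.foldl (v6_tailStep (k : Int)) [] = l.drop (l.length - k) := by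
  induction l using List.reverseRecOn with
  | nil => simp
  | append_singleton l x ih =>
    rw [List.foldl_append, ih]
    simp only [List.foldl_cons, List.foldl_nil, v6_tailStep]
    by_cases h1 : k = 1
    · subst h1
      simp
    · have hk2 : 2 ≤ k := by omega
      have hneg : (-(k : Int) + 1) = -((k - 1 : Nat) : Int) := by push_cast [hk]; ring
      rw [if_neg (by simp; omega), hneg,
        slice_neg_start _ (k - 1) (by omega), List.drop_drop,
        List.length_append, List.length_singleton, List.length_drop,
        List.drop_append_of_le_length (by omega)]
      have : l.length - k + (l.length - (l.length - k) - (k - 1)) = l.length + 1 - k := by omega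
      rw [this]

theorem v6_tail_eq (iterable : List Int) (n : Int) :
    v6_tail iterable n = v6_tail_alt iterable n := by
  unfold v6_tail v6_tail_alt
  by_cases h : n ≤ 0
  · simp [h]
  · rw [if_neg h, if_neg h]
    have hk : n = ((n.toNat : Nat) : Int) := by omega
    rw [hk, foldl_window n.toNat (by omega), slice_neg_start _ n.toNat (by omega)]

-- ===== VERDICT (by name: the statement is the Claim_ definition above) =====
theorem v6_tail_spec : Claim_equal_v6_tail := by
  intro iterable n _
  unfold Spec_v6_tail
  exact v6_tail_eq iterable n
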